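-- pv_equiv track=rewrite | github.com/eduzen/ejercicios | grafos/ex.py | sum_edge_weights
-- ===== SOURCE A (Python) =====
-- def sum_edge_weights(graph, root):
--     # Initialize a set to keep track of visited vertices
--     visited = set()
--
--     # Define a recursive helper function to sum edge weights
--     def helper(node):
--         # Add the current node to the visited set
--         visited.add(node)
--         # Initialize the total weight to the weights of edges connected to the current node
--         total_weight = sum(w for _, w in graph[node] if not visited.__contains__(_))
--         # Recursively sum the weights of edges connected to the descendants of the current node
--         for v, w in graph[node]:
--             if not visited.__contains__(v):
--                 total_weight += helper(v)
--         # Return the total weight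
--         return total_weight
--
--     # Call the helper function with the root node
--     return helper(root)
-- ===== SOURCE B (Python) =====
-- def sum_edge_weights(graph, root):
--     visited = set()
--     total = 0
--     stack = [root]
--     while stack:
--         node = stack.pop()
--         if node in visited:
--             continue
--         visited.add(node)
--         edges = graph[node]
--         total += sum(w for v, w in edges if v not in visited)
--         stack.extend(v for v, _ in reversed(edges))
--     return total
-- ===== Notes on version B (the rewrite author's own statement) =====
-- stated objective: alternative
-- what changed: A's recursive DFS helper (implicit call stack, shared visited set) is replaced by an iterative DFS with an explicit stack: pop a node, skip if visited, otherwise mark it, add the snapshot sum of edge weights to unvisited neighbours to a running total, and push the neighbours in reverse so they pop in list order.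
-- outside the precondition, e.g. on sum_edge_weights({0: [(1, 5)], 1: [], 2: [(3, 7)]}, 0): A returns 5, B returns 5
import Mathlib
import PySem

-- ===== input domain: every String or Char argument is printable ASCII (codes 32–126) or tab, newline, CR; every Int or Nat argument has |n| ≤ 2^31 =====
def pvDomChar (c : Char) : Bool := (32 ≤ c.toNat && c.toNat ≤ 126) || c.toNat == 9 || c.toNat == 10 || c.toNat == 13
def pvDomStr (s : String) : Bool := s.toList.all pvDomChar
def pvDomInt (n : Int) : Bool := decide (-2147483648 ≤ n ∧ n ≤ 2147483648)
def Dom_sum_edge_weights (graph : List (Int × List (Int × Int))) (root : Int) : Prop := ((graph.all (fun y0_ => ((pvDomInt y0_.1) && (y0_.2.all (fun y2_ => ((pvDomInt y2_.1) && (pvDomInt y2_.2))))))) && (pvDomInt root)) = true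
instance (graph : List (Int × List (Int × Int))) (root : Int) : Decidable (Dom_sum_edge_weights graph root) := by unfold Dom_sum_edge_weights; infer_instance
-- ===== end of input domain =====

-- B replaces A's recursive DFS by an iterative explicit-stack DFS (mark and sum at pop
-- time, neighbours pushed in reverse so they pop in list order); objective: alternative
-- decomposition, same asymptotic cost.

-- dict lookup graph[node] under the assoc-list convention (first match; Pre_ demands
-- distinct keys, so this is exactly the Python dict lookup); shared by both ports.
def pvLookup (graph : List (Int × List (Int × Int))) (v : Int) : Option (List (Int × Int)) :=
  (graph.find? (fun p => p.1 == v)).map (·.2)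

-- ===== PORT A =====
-- A's recursive helper, with a fuel guard making the mutual recursion total
-- (none = KeyError or fuel exhausted; under Pre_ the fuel graph.length+1 never runs out).
mutual
def pvHelperA (graph : List (Int × List (Int × Int))) : Nat → Int → PySem.Set Int → Option (Int × PySem.Set Int)
  | 0, _, _ => none
  | Nat.succ fuel, node, visited =>
    -- visited.add(node)
    let visited1 := PySem.Set.add visited node
    match pvLookup graph node with
    | none => none                                  -- graph[node] raises KeyError
    | some edges =>
      -- total_weight = sum(w for _, w in graph[node] if not visited.__contains__(_))
      let tw : Int := ((edges.filter (fun e => !(PySem.Set.contains visited1 e.1))).map Prod.snd).sum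
      -- for v, w in graph[node]: if not visited.__contains__(v): total_weight += helper(v)
      pvRunA graph fuel edges tw visited1
termination_by fuel _ _ => (fuel, 0)

def pvRunA (graph : List (Int × List (Int × Int))) : Nat → List (Int × Int) → Int → PySem.Set Int → Option (Int × PySem.Set Int)
  | _, [], acc, vis => some (acc, vis)
  | fuel, e :: rest, acc, vis =>
    if PySem.Set.contains vis e.1 then pvRunA graph fuel rest acc vis
    else
      match pvHelperA graph fuel e.1 vis with
      | none => none
      | some (r, vis') => pvRunA graph fuel rest (acc + r) vis'
termination_by fuel es _ _ => (fuel, es.length + 1)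
end

def sum_edge_weights (graph : List (Int × List (Int × Int))) (root : Int) : Int :=
  match pvHelperA graph (graph.length + 1) root PySem.Set.empty with
  | some (r, _) => r
  | none => 0    -- unreachable under Pre_ (KeyError / fuel guard)

-- ===== PORT B =====
-- number of graph keys not yet visited (termination measure for the stack loop)
def pvKeysLeft (graph : List (Int × List (Int × Int))) (vis : PySem.Set Int) : Nat :=
  (graph.map Prod.fst).countP (fun k => !(PySem.Set.contains vis k))

theorem pvContainsAdd_not_imp {vis : PySem.Set Int} {v a : Int}
    (ha : (!(PySem.Set.contains (PySem.Set.add vis v) a)) = true) :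
    (!(PySem.Set.contains vis a)) = true := by
  simp only [PySem.Set.contains_eq_listContains, Bool.not_eq_true',
    List.contains_eq_mem, decide_eq_false_iff_not] at ha ⊢
  intro hmem; exact ha ((PySem.Set.mem_add vis v a).mpr (Or.inl hmem))

theorem pvCountP_lt (l : List Int) (p q : Int → Bool)
    (himp : ∀ a, p a = true → q a = true) (v : Int)
    (hm : v ∈ l) (hp : p v = false) (hq : q v = true) :
    l.countP p < l.countP q := by
  induction l with
  | nil => cases hm
  | cons k l ih =>
    simp only [List.countP_cons]
    have hle : l.countP p ≤ l.countP q := List.countP_mono_left (fun a _ ha => himp a ha)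
    rcases List.mem_cons.mp hm with h | h
    · subst h; simp [hp, hq]; omega
    · have := ih h
      cases hpk : p k
      · simp only [Bool.false_eq_true, if_false]; omega
      · simp only [himp k hpk, if_true]; omega

theorem pvCountP_add_lt (l : List Int) (vis : PySem.Set Int) (v : Int)
    (hm : v ∈ l) (hv : PySem.Set.contains vis v = false) :
    l.countP (fun k => !(PySem.Set.contains (PySem.Set.add vis v) k)) <
      l.countP (fun k => !(PySem.Set.contains vis k)) := by
  apply pvCountP_lt _ _ _ (fun a ha => pvContainsAdd_not_imp ha) v hm
  · have hmem : v ∈ PySem.Set.add vis v := (PySem.Set.mem_add vis v v).mpr (Or.inr rfl)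
    simp only [PySem.Set.contains_eq_listContains, List.contains_eq_mem]
    simp [hmem]
  · simp only [PySem.Set.contains_eq_listContains, List.contains_eq_mem] at hv ⊢
    simp only [Bool.not_eq_true', hv]

theorem pvKeysLeft_lt (graph : List (Int × List (Int × Int))) (vis : PySem.Set Int) (v : Int)
    (hm : v ∈ graph.map Prod.fst) (hv : PySem.Set.contains vis v = false) :
    pvKeysLeft graph (PySem.Set.add vis v) < pvKeysLeft graph vis :=
  pvCountP_add_lt _ vis v hm hv

theorem pvLookup_some (graph : List (Int × List (Int × Int))) (v : Int) (edges : List (Int × Int))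
    (h : pvLookup graph v = some edges) : v ∈ graph.map Prod.fst ∧ (v, edges) ∈ graph := by
  unfold pvLookup at h
  cases hfind : graph.find? (fun p => p.1 == v) with
  | none => rw [hfind] at h; cases h
  | some p =>
    rw [hfind] at h
    have hp1 : p.1 = v := by have := List.find?_some hfind; simpa using this
    have hpm : p ∈ graph := List.mem_of_find?_eq_some hfind
    have hp2 : p.2 = edges := by simpa using h
    constructor
    · exact List.mem_map.mpr ⟨p, hpm, hp1⟩
    · have : p = (v, edges) := by cases p; simp_all
      rw [this] at hpm; exact hpm

-- B's while-loop: stack with top at the head (Python pops from the end and extends with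
-- reversed(edges), which is exactly prepending the neighbour list in order).
def pvLoopB (graph : List (Int × List (Int × Int))) (stack : List Int) (vis : PySem.Set Int) (total : Int) : Option (Int × PySem.Set Int) :=
  match stack with
  | [] => some (total, vis)
  | v :: rest =>
    if hv : PySem.Set.contains vis v = true then pvLoopB graph rest vis total
    else
      match hl : pvLookup graph v with
      | none => none                                -- graph[node] raises KeyError
      | some edges =>
        let vis1 := PySem.Set.add vis v
        let tw : Int := ((edges.filter (fun e => !(PySem.Set.contains vis1 e.1))).map Prod.snd).sum
        pvLoopB graph (edges.map Prod.fst ++ rest) vis1 (total + tw)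
termination_by (pvKeysLeft graph vis, stack.length)
decreasing_by
  · exact Prod.Lex.right _ (Nat.lt_succ_self _)
  · exact Prod.Lex.left _ _
      (pvKeysLeft_lt graph vis v (pvLookup_some graph v edges hl).1 (by simpa using hv))

def sum_edge_weights_alt (graph : List (Int × List (Int × Int))) (root : Int) : Int :=
  match pvLoopB graph [root] PySem.Set.empty 0 with
  | some (t, _) => t
  | none => 0    -- unreachable under Pre_ (KeyError)

-- ===== PRECONDITION & SPEC =====
-- Pre_ excludes (a) graphs whose reachable part mentions a key absent from the dict —
-- there Python raises KeyError — conservatively via 'every listed neighbour is a key',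
-- which also drops some graphs with dangling but unreachable neighbours on which A
-- returns; and (b) duplicate keys, impossible for a real Python dict argument.
def Pre_sum_edge_weights (graph : List (Int × List (Int × Int))) (root : Int) : Prop :=
  (graph.map Prod.fst).Nodup ∧ root ∈ graph.map Prod.fst ∧
    ∀ e ∈ graph, ∀ p ∈ e.2, p.1 ∈ graph.map Prod.fst
instance (graph : List (Int × List (Int × Int))) (root : Int) : Decidable (Pre_sum_edge_weights graph root) := by unfold Pre_sum_edge_weights; infer_instance

def pvWitness_sum_edge_weights : (List (Int × List (Int × Int))) × Int :=
  ([(0, [(1, 5), (2, 3)]), (1, [(2, 7)]), (2, [(0, 2)])], 0)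

def Spec_sum_edge_weights (graph : List (Int × List (Int × Int))) (root : Int) (out : Int) : Prop := out = sum_edge_weights_alt graph root
instance (graph : List (Int × List (Int × Int))) (root : Int) (out : Int) : Decidable (Spec_sum_edge_weights graph root out) := by unfold Spec_sum_edge_weights; infer_instance

-- ===== CLAIM (what is proved, stated in full; the proofs are below) =====
def Claim_equal_sum_edge_weights : Prop := ∀ (graph : List (Int × List (Int × Int))) (root : Int), Dom_sum_edge_weights graph root → Pre_sum_edge_weights graph root → Spec_sum_edge_weights graph root (sum_edge_weights graph root)

-- ===== LEMMAS AND PROOFS =====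

-- x ∈ vis is preserved by Set.add
theorem pvMemAdd {vis : PySem.Set Int} {v x : Int} (h : x ∈ vis) : x ∈ PySem.Set.add vis v :=
  (PySem.Set.mem_add vis v x).mpr (Or.inl h)

theorem pvContains_false_of_subset {vis vis' : PySem.Set Int} {x : Int}
    (hsub : ∀ y ∈ vis, y ∈ vis') (h : PySem.Set.contains vis' x = false) :
    PySem.Set.contains vis x = false := by
  simp only [PySem.Set.contains_eq_listContains, List.contains_eq_mem,
    decide_eq_false_iff_not] at h ⊢
  exact fun hm => h (hsub x hm)

theorem pvKeysLeft_mono (graph : List (Int × List (Int × Int))) {vis vis' : PySem.Set Int}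
    (hsub : ∀ y ∈ vis, y ∈ vis') : pvKeysLeft graph vis' ≤ pvKeysLeft graph vis := by
  apply List.countP_mono_left
  intro a _ ha
  simp only [Bool.not_eq_true'] at ha ⊢
  exact pvContains_false_of_subset hsub ha

theorem pvLookup_isSome (graph : List (Int × List (Int × Int))) (v : Int)
    (hm : v ∈ graph.map Prod.fst) : ∃ edges, pvLookup graph v = some edges := by
  unfold pvLookup
  cases hfind : graph.find? (fun p => p.1 == v) with
  | some p => exact ⟨p.2, rfl⟩
  | none =>
    exfalso
    rcases List.mem_map.mp hm with ⟨p, hpm, hp1⟩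
    have := List.find?_eq_none.mp hfind p hpm
    simp [hp1] at this

-- ---- the bridge: processing one recursive call of A equals popping that node in B ----

theorem pvRunA_loopB (graph : List (Int × List (Int × Int))) (fuel : Nat)
    (hH : ∀ node vis r vis', pvHelperA graph fuel node vis = some (r, vis') →
        PySem.Set.contains vis node = false →
        ∀ rest acc, pvLoopB graph (node :: rest) vis acc = pvLoopB graph rest vis' (acc + r)) :
    ∀ (edges : List (Int × Int)) (a : Int) (vis : PySem.Set Int) (r : Int) (vis' : PySem.Set Int),
      pvRunA graph fuel edges a vis = some (r, vis') →
      ∀ rest c, pvLoopB graph (edges.map Prod.fst ++ rest) vis (c + a) =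
                pvLoopB graph rest vis' (c + r) := by
  intro edges
  induction edges with
  | nil =>
    intro a vis r vis' hrun rest c
    simp only [pvRunA] at hrun
    cases hrun
    simp
  | cons e es ih =>
    intro a vis r vis' hrun rest c
    simp only [pvRunA] at hrun
    by_cases hc : PySem.Set.contains vis e.1 = true
    · rw [if_pos hc] at hrun
      have hm : e.1 ∈ vis := by
        simpa [PySem.Set.contains_eq_listContains, List.contains_eq_mem] using hc
      have hstep : pvLoopB graph (e.1 :: (es.map Prod.fst ++ rest)) vis (c + a) =
          pvLoopB graph (es.map Prod.fst ++ rest) vis (c + a) := by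
        rw [pvLoopB]; simp [hm]
      simpa [hstep] using ih a vis r vis' hrun rest c
    · rw [if_neg hc] at hrun
      cases hhelp : pvHelperA graph fuel e.1 vis with
      | none => rw [hhelp] at hrun; cases hrun
      | some p =>
        obtain ⟨re, vise⟩ := p
        rw [hhelp] at hrun
        have hcf : PySem.Set.contains vis e.1 = false := by
          cases h : PySem.Set.contains vis e.1
          · rfl
          · exact absurd h hc
        have h1 := hH e.1 vis re vise hhelp hcf (es.map Prod.fst ++ rest) (c + a)
        have h2 := ih (a + re) vise r vis' hrun rest c
        calc pvLoopB graph ((e :: es).map Prod.fst ++ rest) vis (c + a)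
            = pvLoopB graph (es.map Prod.fst ++ rest) vise ((c + a) + re) := by
              simpa using h1
          _ = pvLoopB graph rest vis' (c + r) := by
              rw [show (c + a) + re = c + (a + re) by ring]; exact h2

theorem pvHelperA_loopB (graph : List (Int × List (Int × Int))) :
    ∀ (fuel : Nat) (node : Int) (vis : PySem.Set Int) (r : Int) (vis' : PySem.Set Int),
      pvHelperA graph fuel node vis = some (r, vis') →
      PySem.Set.contains vis node = false →
      ∀ rest acc, pvLoopB graph (node :: rest) vis acc = pvLoopB graph rest vis' (acc + r) := by
  intro fuel
  induction fuel with
  | zero => intro node vis r vis' h; simp only [pvHelperA] at h; cases h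
  | succ fuel ih =>
    intro node vis r vis' h hc rest acc
    simp only [pvHelperA] at h
    cases hl : pvLookup graph node with
    | none => rw [hl] at h; cases h
    | some edges =>
      rw [hl] at h
      -- B pops node: not visited, looks it up, marks it, adds the same snapshot sum
      rw [pvLoopB]
      simp only [hc, Bool.false_eq_true, dite_false]
      split
      · next heq => rw [heq] at hl; cases hl
      · rename_i edges' heq
        rw [hl] at heq
        injection heq with heq'
        subst heq'
        exact pvRunA_loopB graph fuel ih edges _ (PySem.Set.add vis node) r vis' h rest acc

-- ---- fuel sufficiency for A under Pre_ ----

theorem pvRunA_some (graph : List (Int × List (Int × Int)))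
    (hP : ∀ e ∈ graph, ∀ p ∈ e.2, p.1 ∈ graph.map Prod.fst) (fuel : Nat)
    (hSA : ∀ node vis, node ∈ graph.map Prod.fst → PySem.Set.contains vis node = false →
        pvKeysLeft graph vis ≤ fuel →
        ∃ r vis', pvHelperA graph fuel node vis = some (r, vis') ∧ ∀ x ∈ vis, x ∈ vis') :
    ∀ (edges : List (Int × Int)) (a : Int) (vis : PySem.Set Int),
      (∀ p ∈ edges, p.1 ∈ graph.map Prod.fst) → pvKeysLeft graph vis ≤ fuel →
      ∃ r vis', pvRunA graph fuel edges a vis = some (r, vis') ∧ ∀ x ∈ vis, x ∈ vis' := by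
  intro edges
  induction edges with
  | nil => intro a vis _ _; exact ⟨a, vis, by simp only [pvRunA], fun x hx => hx⟩
  | cons e es ih =>
    intro a vis hks hfu
    by_cases hc : PySem.Set.contains vis e.1 = true
    · obtain ⟨r, vis', hrun, hsub⟩ := ih a vis (fun p hp => hks p (List.mem_cons_of_mem _ hp)) hfu
      exact ⟨r, vis', by simp only [pvRunA, if_pos hc]; exact hrun, hsub⟩
    · have hcf : PySem.Set.contains vis e.1 = false := by
        cases h : PySem.Set.contains vis e.1
        · rfl
        · exact absurd h hc
      obtain ⟨re, vise, hhelp, hsub1⟩ :=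
        hSA e.1 vis (hks e (List.mem_cons_self)) hcf hfu
      obtain ⟨r, vis', hrun, hsub2⟩ := ih (a + re) vise
        (fun p hp => hks p (List.mem_cons_of_mem _ hp))
        (le_trans (pvKeysLeft_mono graph hsub1) hfu)
      refine ⟨r, vis', ?_, fun x hx => hsub2 x (hsub1 x hx)⟩
      simp only [pvRunA, if_neg hc, hhelp]
      exact hrun

theorem pvHelperA_some (graph : List (Int × List (Int × Int)))
    (hP : ∀ e ∈ graph, ∀ p ∈ e.2, p.1 ∈ graph.map Prod.fst) :
    ∀ (fuel : Nat) (node : Int) (vis : PySem.Set Int),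
      node ∈ graph.map Prod.fst → PySem.Set.contains vis node = false →
      pvKeysLeft graph vis ≤ fuel →
      ∃ r vis', pvHelperA graph fuel node vis = some (r, vis') ∧ ∀ x ∈ vis, x ∈ vis' := by
  intro fuel
  induction fuel with
  | zero =>
    intro node vis hm hc hfu
    exfalso
    have : 0 < pvKeysLeft graph vis := by
      apply List.countP_pos_iff.mpr
      exact ⟨node, hm, by simp only [hc, Bool.not_false]⟩
    omega
  | succ fuel ih =>
    intro node vis hm hc hfu
    obtain ⟨edges, hl⟩ := pvLookup_isSome graph node hm
    have hdec : pvKeysLeft graph (PySem.Set.add vis node) ≤ fuel := by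
      have := pvKeysLeft_lt graph vis node hm hc
      omega
    have hks : ∀ p ∈ edges, p.1 ∈ graph.map Prod.fst := by
      intro p hp
      exact hP (node, edges) (pvLookup_some graph node edges hl).2 p hp
    obtain ⟨r, vis', hrun, hsub⟩ := pvRunA_some graph hP fuel ih edges
      (((edges.filter (fun e => !(PySem.Set.contains (PySem.Set.add vis node) e.1))).map Prod.snd).sum)
      (PySem.Set.add vis node) hks hdec
    refine ⟨r, vis', ?_, fun x hx => hsub x (pvMemAdd hx)⟩
    simp only [pvHelperA, hl]
    exact hrun

-- ===== VERDICT (by name: the statement is the Claim_ definition above) =====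
theorem sum_edge_weights_spec : Claim_equal_sum_edge_weights := by
  intro graph root _hdom hpre
  obtain ⟨_hnd, hroot, hP⟩ := hpre
  have hfu : pvKeysLeft graph PySem.Set.empty ≤ graph.length + 1 := by
    have h1 : pvKeysLeft graph PySem.Set.empty ≤ (graph.map Prod.fst).length :=
      List.countP_le_length
    simpa using Nat.le_trans h1 (by simp)
  have hc0 : PySem.Set.contains PySem.Set.empty root = false := rfl
  obtain ⟨r, vis', hsome, _⟩ :=
    pvHelperA_some graph hP (graph.length + 1) root PySem.Set.empty hroot hc0 hfu
  have hb := pvHelperA_loopB graph (graph.length + 1) root PySem.Set.empty r vis' hsome hc0 [] 0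
  unfold Spec_sum_edge_weights sum_edge_weights sum_edge_weights_alt
  rw [hsome, hb]
  simp [pvLoopB]
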